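-- pv_equiv track=rewrite | github.com/kaifang0813/Post-Trade-Allocation | post_trade_allocation.py | sanity_check_on_net_pos_acct
-- ===== SOURCE A (Python) =====
-- def sanity_check_on_net_pos_acct(net_pos_acct, net_pos_acct_new, scale, qt):
--     """
--     Function to make sure that position allocated to each account has same sign as the original
--     trade, for example, we would not allow [2,2,2,-1,0] or [-2,-2,-2,1,0] but would allow
--     [-2,-2,-3,0] or [2,2,3,0]
--
--     Parameters:
--     net_pos_acct: list
--         the net position of each account
--     net_pos_acct_new: list
--         the new position after add the allocation of the new trade (inital guess of next allocation result)
--     scale: int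
--         if buy, 1, else -1
--     qt: int
--         the quantity of trade/order
--
--     Output:
--     net_pos_acct_new: list
--         the allocation of position that pass the sanity check
--     """
--     diff_position = [x - y for x, y in zip(net_pos_acct_new, net_pos_acct)]
--     diff_position_p = list(map(lambda x: 1 if x < 0 else 0, diff_position))
--     diff_position_n = list(map(lambda x: 1 if x > 0 else 0, diff_position))
--
--     if scale > 0 and sum(diff_position_n) > 0:
--         net_pos_acct_new = [y if x < y else x for x, y in zip(net_pos_acct_new, net_pos_acct)]
--         temp = [x - y for x, y in zip(net_pos_acct_new, net_pos_acct)]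
--         while sum(temp) != scale * qt:
--             index_j = temp.index(max(temp))
--             net_pos_acct_new[index_j] = net_pos_acct_new[index_j] - 1
--             temp = [x - y for x, y in zip(net_pos_acct_new, net_pos_acct)]
--
--     elif scale < 0 and sum(diff_position_p) > 0:
--         net_pos_acct_new = [y if x > y else x for x, y in
--                             zip(net_pos_acct_new, net_pos_acct)]
--         temp = [x - y for x, y in zip(net_pos_acct_new, net_pos_acct)]
--
--         while sum(temp) != scale * qt:
--             index_j = temp.index(min(temp))
--             net_pos_acct_new[index_j] = net_pos_acct_new[index_j] + 1
--             temp = [x - y for x, y in zip(net_pos_acct_new, net_pos_acct)]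
--
--     return net_pos_acct_new
-- ===== SOURCE B (Python) =====
-- def sanity_check_on_net_pos_acct(net_pos_acct, net_pos_acct_new, scale, qt):
--     """Water-filling re-implementation: clamp wrong-sign allocations, then find the
--     leveling threshold by binary search and hand the remainder out in index order."""
--     diffs = [x - y for x, y in zip(net_pos_acct_new, net_pos_acct)]
--     target = scale * qt
--     if scale > 0 and any(x > 0 for x in diffs):
--         d = [x if x > 0 else 0 for x in diffs]
--         e = _waterfill(d, target)
--         return [y + v for y, v in zip(net_pos_acct, e)]
--     if scale < 0 and any(x < 0 for x in diffs):
--         d = [-x if x < 0 else 0 for x in diffs]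
--         e = _waterfill(d, -target)
--         return [y - v for y, v in zip(net_pos_acct, e)]
--     return net_pos_acct_new
--
--
-- def _waterfill(d, t):
--     """Given d (nonnegative, nonempty) and t <= sum(d), return the list obtained from d by
--     repeatedly decrementing the first maximum until the sum equals t -- computed directly:
--     level everything above a threshold T (least T with sum(min(x,T)) <= ... >= t), then give
--     the first r entries >= T one extra unit down."""
--     n = len(d)
--     lo = (t - 1) // n                 # sum(min(x,lo)) <= n*lo <= t-1 < t
--     hi = max(d)                       # sum(min(x,hi)) == sum(d) >= t
--     while hi - lo > 1:
--         mid = (lo + hi) // 2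
--         if sum(x if x < mid else mid for x in d) >= t:
--             hi = mid
--         else:
--             lo = mid
--     T = hi
--     r = sum(x if x < T else T for x in d) - t
--     out = []
--     for x in d:
--         if x >= T and r > 0:
--             out.append(T - 1)
--             r -= 1
--         elif x >= T:
--             out.append(T)
--         else:
--             out.append(x)
--     return out
-- ===== Notes on version B (the rewrite author's own statement) =====
-- stated objective: alternative
-- what changed: A removes the allocation surplus one unit at a time, rescanning the whole list for the current extremum on every unit; B computes the same leveled result directly by binary-searching the water-filling threshold T and handing the remainder to the first entries at the threshold in one pass.
import Mathlib
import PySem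

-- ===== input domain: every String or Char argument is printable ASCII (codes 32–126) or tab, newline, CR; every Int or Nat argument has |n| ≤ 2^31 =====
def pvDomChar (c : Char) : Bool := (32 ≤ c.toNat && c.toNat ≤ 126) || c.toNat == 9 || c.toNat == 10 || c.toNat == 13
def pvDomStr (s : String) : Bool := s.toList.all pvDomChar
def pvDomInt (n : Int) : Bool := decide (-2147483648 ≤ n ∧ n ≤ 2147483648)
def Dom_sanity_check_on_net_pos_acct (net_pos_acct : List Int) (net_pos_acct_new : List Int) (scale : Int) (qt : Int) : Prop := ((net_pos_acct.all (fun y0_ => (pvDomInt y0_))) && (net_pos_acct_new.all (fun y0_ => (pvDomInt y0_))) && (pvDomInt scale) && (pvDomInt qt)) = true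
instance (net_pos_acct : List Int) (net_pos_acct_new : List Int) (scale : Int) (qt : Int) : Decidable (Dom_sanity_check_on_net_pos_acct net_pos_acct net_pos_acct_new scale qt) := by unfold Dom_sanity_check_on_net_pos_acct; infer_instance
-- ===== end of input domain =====

-- B replaces A's unit-by-unit "decrement the current maximum" while loop by a direct
-- water-filling computation (binary-search threshold + one distribution pass).

-- ===== PORT A =====
-- the while loop of A's scale>0 branch: recompute temp, stop when its sum hits the target,
-- else decrement the entry holding the (first) maximum; fuel = number of iterations left
def pvLoopA (old : List Int) (target : Int) : Nat → List Int → List Int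
  | 0, cur => cur
  | fuel+1, cur =>
    let temp := List.zipWith (fun x y => x - y) cur old
    if temp.sum = target then cur
    else
      match PySem.List.max? temp (fun x => x) with
      | none => cur
      | some m =>
        match PySem.List.index? temp m with
        | none => cur
        | some j =>
          pvLoopA old target fuel
            (PySem.List.pySetD cur (j : Int) (PySem.List.pyGetD cur (j : Int) 0 - 1))

-- the while loop of A's scale<0 branch (increment the first minimum)
def pvLoopADown (old : List Int) (target : Int) : Nat → List Int → List Int
  | 0, cur => cur
  | fuel+1, cur =>
    let temp := List.zipWith (fun x y => x - y) cur old
    if temp.sum = target then cur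
    else
      match PySem.List.min? temp (fun x => x) with
      | none => cur
      | some m =>
        match PySem.List.index? temp m with
        | none => cur
        | some j =>
          pvLoopADown old target fuel
            (PySem.List.pySetD cur (j : Int) (PySem.List.pyGetD cur (j : Int) 0 + 1))

def sanity_check_on_net_pos_acct (net_pos_acct : List Int) (net_pos_acct_new : List Int) (scale : Int) (qt : Int) : List Int :=
  if scale > 0 ∧ ((List.zipWith (fun x y => x - y) net_pos_acct_new net_pos_acct).map
      (fun x => if x > 0 then (1:Int) else 0)).sum > 0 then
    pvLoopA net_pos_acct (scale * qt)
      ((List.zipWith (fun x y => x - y)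
          (List.zipWith (fun x y => if x < y then y else x) net_pos_acct_new net_pos_acct)
          net_pos_acct).sum - scale * qt).toNat
      (List.zipWith (fun x y => if x < y then y else x) net_pos_acct_new net_pos_acct)
  else if scale < 0 ∧ ((List.zipWith (fun x y => x - y) net_pos_acct_new net_pos_acct).map
      (fun x => if x < 0 then (1:Int) else 0)).sum > 0 then
    pvLoopADown net_pos_acct (scale * qt)
      (scale * qt - (List.zipWith (fun x y => x - y)
          (List.zipWith (fun x y => if x > y then y else x) net_pos_acct_new net_pos_acct)
          net_pos_acct).sum).toNat
      (List.zipWith (fun x y => if x > y then y else x) net_pos_acct_new net_pos_acct)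
  else net_pos_acct_new

-- ===== PORT B =====
-- sum(x if x < T else T for x in d)
def pvS (d : List Int) (T : Int) : Int := (d.map (fun x => if x < T then x else T)).sum

-- Source B's binary-search loop; fuel = initial gap hi - lo (the gap strictly shrinks)
def pvBinSearch (d : List Int) (t : Int) : Nat → Int → Int → Int
  | 0, _, hi => hi
  | fuel+1, lo, hi =>
    if hi - lo > 1 then
      let mid := PySem.Int.floordiv (lo + hi) 2
      if pvS d mid ≥ t then pvBinSearch d t fuel lo mid
      else pvBinSearch d t fuel mid hi
    else hi

-- Source B's output pass: entries ≥ T are leveled to T, the first r of them to T - 1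
def pvEmit : List Int → Int → Int → List Int
  | [], _, _ => []
  | x :: xs, T, r =>
    if x ≥ T ∧ r > 0 then (T - 1) :: pvEmit xs T (r - 1)
    else if x ≥ T then T :: pvEmit xs T r
    else x :: pvEmit xs T r

def pvWaterfill (d : List Int) (t : Int) : List Int :=
  let lo := PySem.Int.floordiv (t - 1) (d.length : Int)
  let hi := match PySem.List.max? d (fun x => x) with | some m => m | none => 0  -- max(d); none unreachable (d nonempty at call sites)
  let T := pvBinSearch d t (hi - lo).toNat lo hi
  pvEmit d T (pvS d T - t)

def sanity_check_on_net_pos_acct_alt (net_pos_acct : List Int) (net_pos_acct_new : List Int) (scale : Int) (qt : Int) : List Int :=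
  if scale > 0 ∧ (List.zipWith (fun x y => x - y) net_pos_acct_new net_pos_acct).any
      (fun x => decide (x > 0)) then
    List.zipWith (fun y v => y + v) net_pos_acct
      (pvWaterfill ((List.zipWith (fun x y => x - y) net_pos_acct_new net_pos_acct).map
        (fun x => if x > 0 then x else 0)) (scale * qt))
  else if scale < 0 ∧ (List.zipWith (fun x y => x - y) net_pos_acct_new net_pos_acct).any
      (fun x => decide (x < 0)) then
    List.zipWith (fun y v => y - v) net_pos_acct
      (pvWaterfill ((List.zipWith (fun x y => x - y) net_pos_acct_new net_pos_acct).map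
        (fun x => if x < 0 then -x else 0)) (-(scale * qt)))
  else net_pos_acct_new

-- ===== PRECONDITION & SPEC =====
-- Pre_ excludes exactly the inputs on which A's while loop never terminates (the clamped
-- allocation surplus is on the wrong side of scale*qt, so the unit steps can never reach it);
-- A returns no value there.
def Pre_sanity_check_on_net_pos_acct (net_pos_acct : List Int) (net_pos_acct_new : List Int) (scale : Int) (qt : Int) : Prop :=
  (scale > 0 → (∃ x ∈ List.zipWith (fun x y => x - y) net_pos_acct_new net_pos_acct, x > 0) →
    scale * qt ≤ ((List.zipWith (fun x y => x - y) net_pos_acct_new net_pos_acct).map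
      (fun x => if x > 0 then x else 0)).sum) ∧
  (scale < 0 → (∃ x ∈ List.zipWith (fun x y => x - y) net_pos_acct_new net_pos_acct, x < 0) →
    -(scale * qt) ≤ ((List.zipWith (fun x y => x - y) net_pos_acct_new net_pos_acct).map
      (fun x => if x < 0 then -x else 0)).sum)
instance (net_pos_acct : List Int) (net_pos_acct_new : List Int) (scale : Int) (qt : Int) : Decidable (Pre_sanity_check_on_net_pos_acct net_pos_acct net_pos_acct_new scale qt) := by unfold Pre_sanity_check_on_net_pos_acct; infer_instance

def pvWitness_sanity_check_on_net_pos_acct : List Int × List Int × Int × Int := ([0, 0, 0], [2, 2, 2], 1, 6)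

def Spec_sanity_check_on_net_pos_acct (net_pos_acct : List Int) (net_pos_acct_new : List Int) (scale : Int) (qt : Int) (out : List Int) : Prop := out = sanity_check_on_net_pos_acct_alt net_pos_acct net_pos_acct_new scale qt
instance (net_pos_acct : List Int) (net_pos_acct_new : List Int) (scale : Int) (qt : Int) (out : List Int) : Decidable (Spec_sanity_check_on_net_pos_acct net_pos_acct net_pos_acct_new scale qt out) := by unfold Spec_sanity_check_on_net_pos_acct; infer_instance

-- ===== CLAIM (what is proved, stated in full; the proofs are below) =====
def Claim_equal_sanity_check_on_net_pos_acct : Prop := ∀ (net_pos_acct : List Int) (net_pos_acct_new : List Int) (scale : Int) (qt : Int), Dom_sanity_check_on_net_pos_acct net_pos_acct net_pos_acct_new scale qt → Pre_sanity_check_on_net_pos_acct net_pos_acct net_pos_acct_new scale qt → Spec_sanity_check_on_net_pos_acct net_pos_acct net_pos_acct_new scale qt (sanity_check_on_net_pos_acct net_pos_acct net_pos_acct_new scale qt)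

-- ===== LEMMAS AND PROOFS =====

-- generic list helpers ------------------------------------------------------

lemma pvZip_add_sub : ∀ (cur old : List Int), cur.length ≤ old.length →
    List.zipWith (fun y v => y + v) old (List.zipWith (fun x y => x - y) cur old) = cur := by
  intro cur
  induction cur with
  | nil => intro old _; simp
  | cons x xs ih =>
    intro old h
    cases old with
    | nil => simp at h
    | cons y ys =>
      simp only [List.zipWith_cons_cons, List.cons.injEq]
      exact ⟨by omega, ih ys (by simpa using h)⟩

lemma pvZip_sub_rev : ∀ (cur old : List Int), cur.length ≤ old.length →
    List.zipWith (fun y v => y - v) old (List.zipWith (fun x y => y - x) cur old) = cur := by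
  intro cur
  induction cur with
  | nil => intro old _; simp
  | cons x xs ih =>
    intro old h
    cases old with
    | nil => simp at h
    | cons y ys =>
      simp only [List.zipWith_cons_cons, List.cons.injEq]
      exact ⟨by omega, ih ys (by simpa using h)⟩

lemma pvZipWith_set (f : Int → Int → Int) : ∀ (cur old : List Int) (j : Nat) (v : Int),
    j < cur.length → j < old.length →
    List.zipWith f (cur.set j v) old = (List.zipWith f cur old).set j (f v (old.getD j 0)) := by
  intro cur
  induction cur with
  | nil => intro old j v h _; simp at h
  | cons x xs ih =>
    intro old j v h ho
    cases old with
    | nil => simp at ho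
    | cons y ys =>
      cases j with
      | zero => simp
      | succ k =>
        simp only [List.set_cons_succ, List.zipWith_cons_cons, List.getD_cons_succ]
        rw [ih ys k v (by simpa using h) (by simpa using ho)]

lemma pvZipWith_zipWith_same (f g : Int → Int → Int) : ∀ (l r : List Int),
    List.zipWith f (List.zipWith g l r) r = List.zipWith (fun x y => f (g x y) y) l r := by
  intro l
  induction l with
  | nil => intro r; simp
  | cons x xs ih =>
    intro r
    cases r with
    | nil => simp
    | cons y ys => simp only [List.zipWith_cons_cons, ih]

lemma pvSum_set : ∀ (l : List Int) (j : Nat) (v : Int), j < l.length →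
    (l.set j v).sum = l.sum - l.getD j 0 + v := by
  intro l
  induction l with
  | nil => intro j v h; simp at h
  | cons x xs ih =>
    intro j v h
    cases j with
    | zero => simp [List.sum_cons]; omega
    | succ k =>
      simp only [List.set_cons_succ, List.sum_cons, List.getD_cons_succ]
      rw [ih k v (by simpa using h)]
      omega

lemma pvGetD_zipWith (f : Int → Int → Int) : ∀ (l r : List Int) (j : Nat),
    j < l.length → j < r.length →
    (List.zipWith f l r).getD j 0 = f (l.getD j 0) (r.getD j 0) := by
  intro l
  induction l with
  | nil => intro r j h _; simp at h
  | cons x xs ih =>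
    intro r j hl hr
    cases r with
    | nil => simp at hr
    | cons y ys =>
      cases j with
      | zero => simp
      | succ k =>
        simp only [List.zipWith_cons_cons, List.getD_cons_succ]
        exact ih ys k (by simpa using hl) (by simpa using hr)

lemma pvSum_ones_nonneg (p : Int → Prop) [DecidablePred p] : ∀ (d : List Int),
    0 ≤ (d.map (fun x => if p x then (1:Int) else 0)).sum := by
  intro d
  induction d with
  | nil => simp
  | cons x xs ih =>
    simp only [List.map_cons, List.sum_cons]
    split <;> omega

lemma pvSum_pos_iff (p : Int → Prop) [DecidablePred p] : ∀ (d : List Int),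
    ((d.map (fun x => if p x then (1:Int) else 0)).sum > 0) ↔ ∃ x ∈ d, p x := by
  intro d
  induction d with
  | nil => simp
  | cons x xs ih =>
    simp only [List.map_cons, List.sum_cons, List.mem_cons, exists_eq_or_imp]
    have := pvSum_ones_nonneg p xs
    split_ifs with hx
    · constructor
      · intro _; exact Or.inl hx
      · intro _; omega
    · constructor
      · intro h; exact Or.inr (ih.mp (by omega))
      · rintro (h | h)
        · exact absurd h hx
        · have := ih.mpr h; omega

lemma pvSum_map_neg : ∀ (d : List Int), (d.map (fun x => -x)).sum = -d.sum := by
  intro d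
  induction d with
  | nil => simp
  | cons x xs ih => simp [List.sum_cons, ih]; omega

lemma pvIndex?_map_neg (v : Int) : ∀ (d : List Int),
    PySem.List.index? (d.map (fun x => -x)) (-v) = PySem.List.index? d v := by
  intro d
  induction d with
  | nil => simp [PySem.List.index?_eq_idxOf?]
  | cons x xs ih =>
    by_cases hx : x = v
    · subst hx
      simp only [List.map_cons]
      rw [PySem.List.index?_cons_self, PySem.List.index?_cons_self]
    · simp only [List.map_cons]
      rw [PySem.List.index?_cons_of_ne _ (by omega : -x ≠ -v), PySem.List.index?_cons_of_ne _ hx, ih]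

lemma pvMin?_map_neg (d : List Int) (M : Int)
    (h : PySem.List.max? d (fun x => x) = some M) :
    PySem.List.min? (d.map (fun x => -x)) (fun x => x) = some (-M) := by
  have hM : M ∈ d := PySem.List.max?_mem h
  have hmax := PySem.List.max?_isMax h
  cases hmin : PySem.List.min? (d.map (fun x => -x)) (fun x => x) with
  | none =>
    rw [PySem.List.min?_eq_none_iff] at hmin
    rcases List.map_eq_nil_iff.mp hmin with rfl
    simp at hM
  | some m =>
    have hm : m ∈ d.map (fun x => -x) := PySem.List.min?_mem hmin
    have hminp := PySem.List.min?_isMin hmin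
    rcases List.mem_map.mp hm with ⟨a, ha, rfl⟩
    have h1 : -a ≤ -M := by
      have := hminp (-M) (List.mem_map_of_mem hM)
      simpa using this
    have h2 : a ≤ M := by simpa using hmax a ha
    congr 1
    omega

-- pvS facts -----------------------------------------------------------------

lemma pvS_le_sum (T : Int) : ∀ (d : List Int), pvS d T ≤ d.sum := by
  intro d
  induction d with
  | nil => simp [pvS]
  | cons x xs ih =>
    simp only [pvS, List.map_cons, List.sum_cons] at *
    split <;> omega

lemma pvS_eq_sum_of_le (T : Int) : ∀ (d : List Int), (∀ x ∈ d, x ≤ T) → pvS d T = d.sum := by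
  intro d
  induction d with
  | nil => simp [pvS]
  | cons x xs ih =>
    intro h
    have hx := h x (by simp)
    have := ih (fun y hy => h y (by simp [hy]))
    simp only [pvS, List.map_cons, List.sum_cons] at *
    split <;> omega

lemma pvS_le_mul (T : Int) : ∀ (d : List Int), pvS d T ≤ (d.length : Int) * T := by
  intro d
  induction d with
  | nil => simp [pvS]
  | cons x xs ih =>
    simp only [pvS, List.map_cons, List.sum_cons, List.length_cons] at *
    have : ((xs.length + 1 : Nat) : Int) * T = (xs.length : Int) * T + T := by push_cast; ring
    rw [this]
    split <;> omega

lemma pvLe_of_pvS_eq_sum (T : Int) : ∀ (d : List Int), pvS d T = d.sum → ∀ x ∈ d, x ≤ T := by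
  intro d
  induction d with
  | nil => simp
  | cons x xs ih =>
    intro h y hy
    have h1 := pvS_le_sum T xs
    simp only [pvS, List.map_cons, List.sum_cons] at h h1
    rcases List.mem_cons.mp hy with rfl | hy'
    · split at h <;> omega
    · apply ih _ _ hy'
      simp only [pvS] at *
      split at h <;> omega

lemma pvS_set (T : Int) : ∀ (d : List Int) (j : Nat) (v : Int), j < d.length →
    pvS (d.set j v) T = pvS d T - (if d.getD j 0 < T then d.getD j 0 else T)
      + (if v < T then v else T) := by
  intro d
  induction d with
  | nil => intro j v h; simp at h
  | cons x xs ih =>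
    intro j v h
    cases j with
    | zero => simp [pvS]; omega
    | succ k =>
      simp only [List.set_cons_succ, pvS, List.map_cons, List.sum_cons, List.getD_cons_succ]
      have := ih k v (by simpa using h)
      simp only [pvS] at this
      omega

-- pvEmit facts --------------------------------------------------------------

lemma pvEmit_id (T : Int) : ∀ (d : List Int), (∀ x ∈ d, x ≤ T) → pvEmit d T 0 = d := by
  intro d
  induction d with
  | nil => intro _; simp [pvEmit]
  | cons x xs ih =>
    intro h
    have hx := h x (by simp)
    simp only [pvEmit]
    rw [if_neg (by omega)]
    split_ifs with h2
    · rw [ih (fun y hy => h y (by simp [hy]))]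
      congr 1
      omega
    · rw [ih (fun y hy => h y (by simp [hy]))]

lemma pvEmit_set_ge (T : Int) : ∀ (d : List Int) (j : Nat) (v r : Int), j < d.length →
    T ≤ d.getD j 0 → T ≤ v → pvEmit (d.set j v) T r = pvEmit d T r := by
  intro d
  induction d with
  | nil => intro j v r h; simp at h
  | cons x xs ih =>
    intro j v r hj hx hv
    cases j with
    | zero =>
      simp only [List.getD_cons_zero] at hx
      simp only [List.set_cons_zero, pvEmit]
      split_ifs <;> first | rfl | omega
    | succ k =>
      simp only [List.set_cons_succ, List.getD_cons_succ] at *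
      simp only [pvEmit]
      have hk : k < xs.length := by simpa using hj
      split_ifs <;> rw [ih k v _ hk hx hv]

lemma pvEmit_first (T : Int) : ∀ (d : List Int) (j : Nat) (r : Int), j < d.length →
    d.getD j 0 = T → (∀ i, i < j → d.getD i 0 < T) → 1 ≤ r →
    pvEmit d T r = pvEmit (d.set j (T - 1)) T (r - 1) := by
  intro d
  induction d with
  | nil => intro j r h; simp at h
  | cons x xs ih =>
    intro j r hj hx hfirst hr
    cases j with
    | zero =>
      simp only [List.getD_cons_zero] at hx
      subst hx
      simp only [List.set_cons_zero, pvEmit]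
      rw [if_pos ⟨le_refl _, by omega⟩, if_neg (by omega), if_neg (by omega)]
    | succ k =>
      have hx0 : x < T := hfirst 0 (by omega)
      simp only [List.set_cons_succ, pvEmit]
      rw [if_neg (by omega), if_neg (by omega), if_neg (by omega), if_neg (by omega)]
      congr 1
      exact ih k r (by simpa using hj) (by simpa using hx)
        (fun i hi => hfirst (i + 1) (by omega)) hr

-- binary search returns a good threshold ------------------------------------

lemma pvBinSearch_good (d : List Int) (t : Int) : ∀ (fuel : Nat) (lo hi : Int),
    pvS d lo < t → t ≤ pvS d hi → lo < hi → (hi - lo).toNat ≤ fuel →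
    t ≤ pvS d (pvBinSearch d t fuel lo hi) ∧ pvS d (pvBinSearch d t fuel lo hi - 1) < t := by
  intro fuel
  induction fuel with
  | zero => intro lo hi _ _ hlt hf; omega
  | succ n ih =>
    intro lo hi hlo hhi hlt hf
    have hmid : PySem.Int.floordiv (lo + hi) 2 = (lo + hi) / 2 :=
      PySem.Int.floordiv_eq_ediv_of_pos (by norm_num)
    simp only [pvBinSearch]
    split_ifs with hgap hS
    · exact ih lo _ hlo hS (by rw [hmid]; omega) (by rw [hmid]; omega)
    · exact ih _ hi (by omega) hhi (by rw [hmid]; omega) (by rw [hmid]; omega)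
    · refine ⟨hhi, ?_⟩
      rw [show hi - 1 = lo by omega]
      exact hlo

-- the abstract unit loop on temp --------------------------------------------

def pvLoopT (t : Int) : Nat → List Int → List Int
  | 0, temp => temp
  | fuel+1, temp =>
    if temp.sum = t then temp
    else
      match PySem.List.max? temp (fun x => x) with
      | none => temp
      | some m =>
        match PySem.List.index? temp m with
        | none => temp
        | some j => pvLoopT t fuel (temp.set j (m - 1))

lemma pvLoopT_eq (t T : Int) : ∀ (fuel : Nat) (temp : List Int), temp ≠ [] →
    t ≤ pvS temp T → pvS temp (T - 1) < t → temp.sum = t + fuel →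
    pvLoopT t fuel temp = pvEmit temp T (pvS temp T - t) := by
  intro fuel
  induction fuel with
  | zero =>
    intro temp hne hge hlt hsum
    have hS : pvS temp T = temp.sum := le_antisymm (pvS_le_sum T temp) (by omega)
    rw [hS, hsum, show t + ((0:Nat):Int) - t = 0 by simp]
    simp only [pvLoopT]
    exact (pvEmit_id T temp (pvLe_of_pvS_eq_sum T temp hS)).symm
  | succ fuel ih =>
    intro temp hne hge hlt hsum
    simp only [pvLoopT]
    rw [if_neg (by omega)]
    cases hmax : PySem.List.max? temp (fun x => x) with
    | none => exact absurd ((PySem.List.max?_eq_none_iff temp _).mp hmax) hne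
    | some m =>
    dsimp only
    have hmem : m ∈ temp := PySem.List.max?_mem hmax
    have hmaxp : ∀ y ∈ temp, y ≤ m := fun y hy => PySem.List.max?_isMax hmax y hy
    cases hidx : PySem.List.index? temp m with
    | none =>
      have := (PySem.List.index?_isSome_iff temp m).mpr hmem
      rw [hidx] at this; simp at this
    | some j =>
    dsimp only
    obtain ⟨hj, hjm, hfirst⟩ := PySem.List.getElem_of_index?_eq_some hidx
    have hgd : temp.getD j 0 = m := by rw [List.getD_eq_getElem temp 0 hj]; exact hjm
    have hTm : T ≤ m := by
      by_contra hc
      have : ∀ x ∈ temp, x ≤ T - 1 := fun x hx => by have := hmaxp x hx; omega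
      have := pvS_eq_sum_of_le (T - 1) temp this
      omega
    have hlen : (temp.set j (m - 1)).length = temp.length := List.length_set ..
    have hne' : temp.set j (m - 1) ≠ [] := by
      intro hc
      apply hne
      rw [← List.length_eq_zero_iff] at hc ⊢
      omega
    have hsum' : (temp.set j (m - 1)).sum = temp.sum - 1 := by
      rw [pvSum_set temp j (m - 1) hj, hgd]; ring
    have hS1 : pvS (temp.set j (m - 1)) (T - 1) = pvS temp (T - 1) := by
      rw [pvS_set (T - 1) temp j (m - 1) hj, hgd,
        if_neg (by omega), if_neg (by omega)]
      ring
    by_cases hTm' : T ≤ m - 1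
    · have hS0 : pvS (temp.set j (m - 1)) T = pvS temp T := by
        rw [pvS_set T temp j (m - 1) hj, hgd, if_neg (by omega), if_neg (by omega)]
        ring
      rw [ih (temp.set j (m - 1)) hne' (by omega) (by omega) (by omega), hS0,
        pvEmit_set_ge T temp j (m - 1) (pvS temp T - t) hj (by omega) (by omega)]
    · have hmT : m = T := by omega
      subst hmT
      have hSfull : pvS temp m = temp.sum :=
        pvS_eq_sum_of_le m temp hmaxp
      have hS0 : pvS (temp.set j (m - 1)) m = pvS temp m - 1 := by
        rw [pvS_set m temp j (m - 1) hj, hgd, if_neg (by omega), if_pos (by omega)]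
        ring
      rw [ih (temp.set j (m - 1)) hne' (by omega) (by omega) (by omega), hS0]
      have hemit := pvEmit_first m temp j (pvS temp m - t) hj hgd
        (fun i hi => by
          have hil : i < temp.length := by omega
          have h1 : temp.getD i 0 = temp[i] := List.getD_eq_getElem temp 0 hil
          have h2 := hfirst i hi
          have h3 := hmaxp temp[i] (List.getElem_mem hil)
          rw [h1]
          omega)
        (by omega)
      rw [show pvS temp m - 1 - t = pvS temp m - t - 1 by ring, ← hemit]

-- A's loops are the abstract loop -------------------------------------------

lemma pvLoopA_eq (old : List Int) (t : Int) : ∀ (fuel : Nat) (cur : List Int),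
    cur.length ≤ old.length →
    pvLoopA old t fuel cur =
      List.zipWith (fun y v => y + v) old
        (pvLoopT t fuel (List.zipWith (fun x y => x - y) cur old)) := by
  intro fuel
  induction fuel with
  | zero => intro cur h; simp only [pvLoopA, pvLoopT]; exact (pvZip_add_sub cur old h).symm
  | succ fuel ih =>
    intro cur h
    simp only [pvLoopA, pvLoopT]
    by_cases hg : (List.zipWith (fun x y => x - y) cur old).sum = t
    · rw [if_pos hg, if_pos hg]
      exact (pvZip_add_sub cur old h).symm
    · rw [if_neg hg, if_neg hg]
      cases hmax : PySem.List.max? (List.zipWith (fun x y => x - y) cur old) (fun x => x) with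
      | none => exact (pvZip_add_sub cur old h).symm
      | some m =>
      dsimp only
      cases hidx : PySem.List.index? (List.zipWith (fun x y => x - y) cur old) m with
      | none => exact (pvZip_add_sub cur old h).symm
      | some j =>
      dsimp only
      obtain ⟨hj, hjm, _⟩ := PySem.List.getElem_of_index?_eq_some hidx
      have hlen : (List.zipWith (fun x y : Int => x - y) cur old).length
          = min cur.length old.length := List.length_zipWith
      have hjc : j < cur.length := by omega
      have hjo : j < old.length := by omega
      rw [PySem.List.pySetD_natCast, PySem.List.pyGetD_natCast]
      rw [ih (cur.set j (cur.getD j 0 - 1)) (by rw [List.length_set]; exact h)]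
      have hv : cur.getD j 0 - 1 - old.getD j 0 = m - 1 := by
        have h1 : (List.zipWith (fun x y : Int => x - y) cur old).getD j 0
            = cur.getD j 0 - old.getD j 0 := pvGetD_zipWith (fun x y => x - y) cur old j hjc hjo
        have h2 : (List.zipWith (fun x y : Int => x - y) cur old).getD j 0 = m := by
          rw [List.getD_eq_getElem _ 0 hj]; exact hjm
        omega
      rw [pvZipWith_set (fun x y => x - y) cur old j (cur.getD j 0 - 1) hjc hjo]
      rw [hv]

lemma pvLoopADown_eq (old : List Int) (t : Int) : ∀ (fuel : Nat) (cur : List Int),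
    cur.length ≤ old.length →
    pvLoopADown old t fuel cur =
      List.zipWith (fun y v => y - v) old
        (pvLoopT (-t) fuel (List.zipWith (fun x y => y - x) cur old)) := by
  intro fuel
  induction fuel with
  | zero => intro cur h; simp only [pvLoopADown, pvLoopT]; exact (pvZip_sub_rev cur old h).symm
  | succ fuel ih =>
    intro cur h
    have hfun : (fun x y : Int => -(y - x)) = (fun x y : Int => x - y) := by
      funext a b; ring
    have htemp : List.zipWith (fun x y : Int => x - y) cur old
        = (List.zipWith (fun x y : Int => y - x) cur old).map (fun x => -x) := by
      rw [List.map_zipWith, hfun]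
    simp only [pvLoopADown, pvLoopT]
    by_cases hg : (List.zipWith (fun x y : Int => y - x) cur old).sum = -t
    · rw [if_pos (by rw [htemp, pvSum_map_neg]; omega), if_pos hg]
      exact (pvZip_sub_rev cur old h).symm
    · rw [if_neg (by rw [htemp, pvSum_map_neg]; omega), if_neg hg]
      cases hmax : PySem.List.max? (List.zipWith (fun x y : Int => y - x) cur old) (fun x => x) with
      | none =>
        have hd : List.zipWith (fun x y : Int => y - x) cur old = [] :=
          (PySem.List.max?_eq_none_iff _ _).mp hmax
        have hmin : PySem.List.min? (List.zipWith (fun x y : Int => x - y) cur old) (fun x => x) = none := by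
          rw [htemp, hd]
          simp [PySem.List.min?_eq_none_iff]
        rw [hmin]
        exact (pvZip_sub_rev cur old h).symm
      | some M =>
      have hmin : PySem.List.min? (List.zipWith (fun x y : Int => x - y) cur old) (fun x => x)
          = some (-M) := by
        rw [htemp]; exact pvMin?_map_neg _ M hmax
      rw [hmin]
      dsimp only
      have hidxeq : PySem.List.index? (List.zipWith (fun x y : Int => x - y) cur old) (-M)
          = PySem.List.index? (List.zipWith (fun x y : Int => y - x) cur old) M := by
        rw [htemp, pvIndex?_map_neg]
      rw [hidxeq]
      cases hidx : PySem.List.index? (List.zipWith (fun x y : Int => y - x) cur old) M with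
      | none => exact (pvZip_sub_rev cur old h).symm
      | some j =>
      dsimp only
      obtain ⟨hj, hjm, _⟩ := PySem.List.getElem_of_index?_eq_some hidx
      have hlen : (List.zipWith (fun x y : Int => y - x) cur old).length
          = min cur.length old.length := List.length_zipWith
      have hjc : j < cur.length := by omega
      have hjo : j < old.length := by omega
      rw [PySem.List.pySetD_natCast, PySem.List.pyGetD_natCast]
      rw [ih (cur.set j (cur.getD j 0 + 1)) (by rw [List.length_set]; exact h)]
      have hv : old.getD j 0 - (cur.getD j 0 + 1) = M - 1 := by
        have h1 : (List.zipWith (fun x y : Int => y - x) cur old).getD j 0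
            = old.getD j 0 - cur.getD j 0 := pvGetD_zipWith (fun x y => y - x) cur old j hjc hjo
        have h2 : (List.zipWith (fun x y : Int => y - x) cur old).getD j 0 = M := by
          rw [List.getD_eq_getElem _ 0 hj]; exact hjm
        omega
      rw [pvZipWith_set (fun x y => y - x) cur old j (cur.getD j 0 + 1) hjc hjo]
      rw [hv]

-- waterfill = abstract loop -------------------------------------------------

lemma pvWaterfill_eq_loopT (d : List Int) (t : Int) (hne : d ≠ []) (hle : t ≤ d.sum)
    (fuel : Nat) (hfuel : d.sum = t + fuel) : pvLoopT t fuel d = pvWaterfill d t := by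
  simp only [pvWaterfill]
  cases hmax : PySem.List.max? d (fun x => x) with
  | none => exact absurd ((PySem.List.max?_eq_none_iff d _).mp hmax) hne
  | some M =>
  dsimp only
  have hn : 0 < d.length := List.length_pos_iff.mpr hne
  have hnz : (0:Int) < (d.length : Int) := by exact_mod_cast hn
  have hmaxp : ∀ y ∈ d, y ≤ M := fun y hy => PySem.List.max?_isMax hmax y hy
  have hShi : pvS d M = d.sum := pvS_eq_sum_of_le M d hmaxp
  have hdiv := PySem.Int.floordiv_mul_add_mod (t - 1) (d.length : Int)
  have hmod := PySem.Int.mod_nonneg (t - 1) hnz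
  have hlon : (d.length : Int) * PySem.Int.floordiv (t - 1) (d.length : Int) ≤ t - 1 := by
    nlinarith [hdiv, hmod]
  have hSlo : pvS d (PySem.Int.floordiv (t - 1) (d.length : Int)) < t := by
    have := pvS_le_mul (PySem.Int.floordiv (t - 1) (d.length : Int)) d
    linarith
  have hlohi : PySem.Int.floordiv (t - 1) (d.length : Int) < M := by
    have h1 := pvS_le_mul M d
    have h2 : (d.length : Int) * PySem.Int.floordiv (t - 1) (d.length : Int)
        < (d.length : Int) * M := by linarith
    exact lt_of_mul_lt_mul_left h2 (by omega)
  have hgood := pvBinSearch_good d t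
    ((M - PySem.Int.floordiv (t - 1) (d.length : Int)).toNat)
    (PySem.Int.floordiv (t - 1) (d.length : Int)) M hSlo (by omega) hlohi (le_refl _)
  exact pvLoopT_eq t _ fuel d hne hgood.1 hgood.2 hfuel

-- clamp identities ----------------------------------------------------------

lemma pvClamp_up (new old : List Int) :
    List.zipWith (fun x y => x - y)
      (List.zipWith (fun x y => if x < y then y else x) new old) old =
    (List.zipWith (fun x y => x - y) new old).map (fun x => if x > 0 then x else 0) := by
  rw [pvZipWith_zipWith_same, List.map_zipWith]
  have : (fun x y : Int => (if x < y then y else x) - y)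
      = (fun x y : Int => if x - y > 0 then x - y else 0) := by
    funext a b; split_ifs <;> omega
  rw [this]

lemma pvClamp_down (new old : List Int) :
    List.zipWith (fun x y => y - x)
      (List.zipWith (fun x y => if x > y then y else x) new old) old =
    (List.zipWith (fun x y => x - y) new old).map (fun x => if x < 0 then -x else 0) := by
  rw [pvZipWith_zipWith_same, List.map_zipWith]
  have : (fun x y : Int => y - (if x > y then y else x))
      = (fun x y : Int => if x - y < 0 then -(x - y) else 0) := by
    funext a b; split_ifs <;> omega
  rw [this]

-- ===== VERDICT (by name: the statement is the Claim_ definition above) =====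
-- condition bridges used by the main proof
lemma pvCondUp (d : List Int) :
    (((d.map (fun x => if x > 0 then (1:Int) else 0)).sum > 0)) ↔
      (d.any (fun x => decide (x > 0)) = true) := by
  rw [pvSum_pos_iff (fun x : Int => x > 0) d]
  simp

lemma pvCondDown (d : List Int) :
    (((d.map (fun x => if x < 0 then (1:Int) else 0)).sum > 0)) ↔
      (d.any (fun x => decide (x < 0)) = true) := by
  rw [pvSum_pos_iff (fun x : Int => x < 0) d]
  simp

theorem sanity_check_on_net_pos_acct_spec : Claim_equal_sanity_check_on_net_pos_acct := by
  intro old new scale qt _hdom hpre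
  unfold Spec_sanity_check_on_net_pos_acct
  unfold sanity_check_on_net_pos_acct sanity_check_on_net_pos_acct_alt
  simp only [pvCondUp, pvCondDown]
  split_ifs with h1 h2
  · -- scale > 0 branch
    obtain ⟨hs, hany⟩ := h1
    have hex : ∃ x ∈ List.zipWith (fun x y => x - y) new old, x > 0 := by
      simpa using hany
    have hle := hpre.1 hs hex
    have hne : (List.zipWith (fun x y : Int => x - y) new old).map
        (fun x => if x > 0 then x else 0) ≠ [] := by
      rcases hex with ⟨x, hx, _⟩
      intro hc
      rw [List.map_eq_nil_iff] at hc
      rw [hc] at hx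
      simp at hx
    have hlen1 : (List.zipWith (fun x y : Int => if x < y then y else x) new old).length
        ≤ old.length := by
      rw [List.length_zipWith]; omega
    rw [pvLoopA_eq old (scale * qt) _ _ hlen1, pvClamp_up]
    rw [pvWaterfill_eq_loopT _ (scale * qt) hne hle _ (by omega)]
  · -- scale < 0 branch
    obtain ⟨hs, hany⟩ := h2
    have hex : ∃ x ∈ List.zipWith (fun x y => x - y) new old, x < 0 := by
      simpa using hany
    have hle := hpre.2 hs hex
    have hne : (List.zipWith (fun x y : Int => x - y) new old).map
        (fun x => if x < 0 then -x else 0) ≠ [] := by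
      rcases hex with ⟨x, hx, _⟩
      intro hc
      rw [List.map_eq_nil_iff] at hc
      rw [hc] at hx
      simp at hx
    have hlen1 : (List.zipWith (fun x y : Int => if x > y then y else x) new old).length
        ≤ old.length := by
      rw [List.length_zipWith]; omega
    have hsum : (List.zipWith (fun x y : Int => x - y)
        (List.zipWith (fun x y : Int => if x > y then y else x) new old) old).sum
        = -(((List.zipWith (fun x y : Int => x - y) new old).map
            (fun x => if x < 0 then -x else 0)).sum) := by
      have hfun : (fun x y : Int => -(y - x)) = (fun x y : Int => x - y) := by
        funext a b; ring
      rw [show List.zipWith (fun x y : Int => x - y)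
            (List.zipWith (fun x y : Int => if x > y then y else x) new old) old
          = (List.zipWith (fun x y : Int => y - x)
            (List.zipWith (fun x y : Int => if x > y then y else x) new old) old).map
              (fun x => -x) by rw [List.map_zipWith, hfun]]
      rw [pvSum_map_neg, pvClamp_down]
    rw [pvLoopADown_eq old (scale * qt) _ _ hlen1, pvClamp_down]
    rw [pvWaterfill_eq_loopT _ (-(scale * qt)) hne hle _ (by rw [hsum]; omega)]
  · rfl
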